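-- pv_equiv track=rewrite | github.com/the-omega-institute/automath | theory/2026_golden_ratio_driven_scan_projection_generation_recursive_emergence/scripts/exp_foldbin6_fiber_affine_geometry.py | _is_affine_subspace
-- ===== SOURCE A (Python) =====
-- from typing import Dict, List, Tuple
--
-- def _is_affine_subspace(points: List[int]) -> bool:
--     """Affine subspace iff size is power of 2 and difference set is linear subspace."""
--     n = len(points)
--     if n == 0:
--         return False
--     if n & (n - 1):
--         return False
--     p0 = points[0]
--     L = {p ^ p0 for p in points}
--     for a in L:
--         for b in L:
--             if (a ^ b) not in L:
--                 return False
--     return True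
-- ===== SOURCE B (Python) =====
-- def _is_affine_subspace(points):
--     n = len(points)
--     if n == 0 or n & (n - 1):
--         return False
--     p0 = points[0]
--     diffs = {p ^ p0 for p in points}
--     span = {0}
--     for d in diffs:
--         if d not in span:
--             if 2 * len(span) > len(diffs):
--                 return False
--             span |= {x ^ d for x in span}
--     return len(span) == len(diffs)
-- ===== Notes on version B (the rewrite author's own statement) =====
-- stated objective: alternative
-- what changed: A verifies closure of the XOR-difference set by testing all O(n^2) pairs; B instead grows the generated XOR-span incrementally (doubling a subgroup by one coset per new generator, with a size cutoff) and compares its size to the difference set's size.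
import Mathlib
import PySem

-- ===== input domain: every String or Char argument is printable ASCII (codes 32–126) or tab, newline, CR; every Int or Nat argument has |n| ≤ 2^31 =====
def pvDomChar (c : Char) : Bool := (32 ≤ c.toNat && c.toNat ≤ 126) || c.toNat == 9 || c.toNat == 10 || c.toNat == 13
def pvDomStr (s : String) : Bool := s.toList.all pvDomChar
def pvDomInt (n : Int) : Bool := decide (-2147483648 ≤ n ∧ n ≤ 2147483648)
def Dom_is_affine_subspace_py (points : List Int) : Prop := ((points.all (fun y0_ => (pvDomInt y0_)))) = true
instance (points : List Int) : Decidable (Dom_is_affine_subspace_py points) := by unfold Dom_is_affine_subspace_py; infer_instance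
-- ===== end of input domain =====

-- B replaces A's quadratic all-pairs closure check of the XOR-difference set by an incremental
-- span-doubling construction with a size cutoff (objective: a different, coset-based algorithm).

-- ===== PORT A =====
-- A: n==0 → False; n not a power of two → False; else check the XOR-difference set is closed
-- under XOR by the double loop 'for a in L: for b in L: if (a ^ b) not in L: return False'.
def is_affine_subspace_py (points : List Int) : Bool :=
  match points with
  | [] => false                                  -- the 'n == 0' early return
  | p0 :: _ =>
    let n : Int := (points.length : Int)
    if PySem.Int.band n (n - 1) != 0 then false
    else
      let L : PySem.Set Int := PySem.Set.ofList (points.map (fun p => PySem.Int.bxor p p0))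
      L.all (fun a => L.all (fun b => PySem.Set.contains L (PySem.Int.bxor a b)))

-- ===== PORT B =====
-- one step of B's loop body; state 'none' models B's early 'return False'
def pvSpanStep (dlen : Int) (st : Option (PySem.Set Int)) (d : Int) : Option (PySem.Set Int) :=
  match st with
  | none => none
  | some span =>
    if PySem.Set.contains span d then some span
    else if 2 * PySem.Set.len span > dlen then none
    else some (PySem.Set.union span (span.map (fun x => PySem.Int.bxor x d)))

def is_affine_subspace_py_alt (points : List Int) : Bool :=
  match points with
  | [] => false                                  -- the 'n == 0' early return
  | p0 :: _ =>
    let n : Int := (points.length : Int)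
    if PySem.Int.band n (n - 1) != 0 then false
    else
      let diffs : PySem.Set Int := PySem.Set.ofList (points.map (fun p => PySem.Int.bxor p p0))
      match diffs.foldl (pvSpanStep (PySem.Set.len diffs)) (some (PySem.Set.ofList [0])) with
      | none => false                            -- the early 'return False'
      | some span => PySem.Set.len span == PySem.Set.len diffs

-- ===== PRECONDITION & SPEC =====
def Spec_is_affine_subspace_py (points : List Int) (out : Bool) : Prop := out = is_affine_subspace_py_alt points
instance (points : List Int) (out : Bool) : Decidable (Spec_is_affine_subspace_py points out) := by unfold Spec_is_affine_subspace_py; infer_instance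

-- ===== CLAIM (what is proved, stated in full; the proofs are below) =====
def Claim_equal_is_affine_subspace_py : Prop := ∀ (points : List Int), Dom_is_affine_subspace_py points → Spec_is_affine_subspace_py points (is_affine_subspace_py points)

-- ===== LEMMAS AND PROOFS =====

-- Python's '^' on Int as componentwise XOR of (magnitude, sign), to get the group laws
def pvMag (a : Int) : Nat := if 0 ≤ a then a.toNat else (-a - 1).toNat
def pvDec (m : Nat) (s : Bool) : Int := if s then -(m : Int) - 1 else (m : Int)

lemma pvBxor_eq (a b : Int) :
    PySem.Int.bxor a b = pvDec (pvMag a ^^^ pvMag b) (decide (a < 0) != decide (b < 0)) := by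
  unfold PySem.Int.bxor pvDec pvMag
  split_ifs with h1 h2 h3 <;> simp_all <;> omega

lemma pvMag_dec (m : Nat) (s : Bool) : pvMag (pvDec m s) = m := by
  cases s <;> simp [pvDec, pvMag] <;> omega

lemma pvNeg_dec (m : Nat) (s : Bool) : decide (pvDec m s < 0) = s := by
  cases s <;> simp [pvDec] <;> omega

lemma pvBxor_assoc (a b c : Int) :
    PySem.Int.bxor (PySem.Int.bxor a b) c = PySem.Int.bxor a (PySem.Int.bxor b c) := by
  rw [pvBxor_eq a b, pvBxor_eq b c, pvBxor_eq, pvBxor_eq, pvMag_dec, pvMag_dec, pvNeg_dec,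
    pvNeg_dec, Nat.xor_assoc]
  cases (decide (a < 0)) <;> cases (decide (b < 0)) <;> cases (decide (c < 0)) <;> rfl

lemma pvBxor_zero_left (b : Int) : PySem.Int.bxor 0 b = b := by
  rw [PySem.Int.bxor_comm]; exact PySem.Int.bxor_zero b

lemma pvBxor_cancel_right (x d : Int) : PySem.Int.bxor (PySem.Int.bxor x d) d = x := by
  rw [pvBxor_assoc, PySem.Int.bxor_self, PySem.Int.bxor_zero]

lemma pvBxor_coset2 (x d b : Int) :
    PySem.Int.bxor (PySem.Int.bxor x d) b = PySem.Int.bxor (PySem.Int.bxor x b) d := by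
  rw [pvBxor_assoc, pvBxor_assoc, PySem.Int.bxor_comm d b]

lemma pvBxor_coset3 (x y d : Int) :
    PySem.Int.bxor (PySem.Int.bxor x d) (PySem.Int.bxor y d) = PySem.Int.bxor x y := by
  rw [pvBxor_coset2, ← pvBxor_assoc x y d, pvBxor_cancel_right]

-- the closure property A's double loop checks
def pvClosed (S : List Int) : Prop := ∀ a ∈ S, ∀ b ∈ S, PySem.Int.bxor a b ∈ S

lemma pvAll_iff (L : List Int) :
    (L.all (fun a => L.all (fun b => PySem.Set.contains L (PySem.Int.bxor a b))) = true) ↔ pvClosed L := by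
  simp [pvClosed, PySem.Set.contains, List.all_eq_true]

lemma pvLen_le (l1 l2 : List Int) (h : l1.Nodup) (hs : l1 ⊆ l2) : l1.length ≤ l2.length := by
  calc l1.length = l1.toFinset.card := by rw [List.toFinset_card_of_nodup h]
    _ ≤ l2.toFinset.card := Finset.card_le_card (by intro x hx; simp at hx ⊢; exact hs hx)
    _ ≤ l2.length := l2.toFinset_card_le

lemma pvMem_eq (l1 l2 : List Int) (h1 : l1.Nodup) (h2 : l2.Nodup) (hs : l1 ⊆ l2)
    (hl : l2.length ≤ l1.length) : ∀ x, x ∈ l2 ↔ x ∈ l1 := by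
  have he : l1.toFinset = l2.toFinset := by
    apply Finset.eq_of_subset_of_card_le (by intro x hx; simp at hx ⊢; exact hs hx)
    rw [List.toFinset_card_of_nodup h1, List.toFinset_card_of_nodup h2]; exact hl
  intro x; constructor
  · intro hx
    have : x ∈ l1.toFinset := by rw [he]; simpa using hx
    simpa using this
  · exact fun hx => hs hx

-- loop invariant of B's span
def pvInv (S : List Int) : Prop := S.Nodup ∧ (0 : Int) ∈ S ∧ pvClosed S

lemma pvFold_none (l : List Int) (dlen : Int) : l.foldl (pvSpanStep dlen) none = none := by
  induction l with
  | nil => rfl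
  | cons x t ih => simpa [pvSpanStep] using ih

-- the doubled span: membership and invariant
lemma pvUnion_mem (span : PySem.Set Int) (d y : Int) :
    y ∈ PySem.Set.union span (span.map (fun x => PySem.Int.bxor x d)) ↔
      y ∈ span ∨ ∃ x ∈ span, PySem.Int.bxor x d = y := by
  simp [PySem.Set.mem_union, List.mem_map]

lemma pvUnion_inv (span : PySem.Set Int) (d : Int) (hI : pvInv span) :
    pvInv (PySem.Set.union span (span.map (fun x => PySem.Int.bxor x d))) := by
  obtain ⟨hN, h0, hC⟩ := hI
  refine ⟨PySem.Set.nodup_union _ _ hN, (pvUnion_mem span d 0).mpr (Or.inl h0), ?_⟩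
  intro a ha b hb
  rcases (pvUnion_mem span d a).mp ha with ha' | ⟨x, hx, rfl⟩ <;>
    rcases (pvUnion_mem span d b).mp hb with hb' | ⟨y, hy, rfl⟩
  · exact (pvUnion_mem span d _).mpr (Or.inl (hC _ ha' _ hb'))
  · refine (pvUnion_mem span d _).mpr (Or.inr ⟨PySem.Int.bxor a y, hC _ ha' _ hy, ?_⟩)
    rw [← pvBxor_assoc]
  · refine (pvUnion_mem span d _).mpr (Or.inr ⟨PySem.Int.bxor x b, hC _ hx _ hb', ?_⟩)
    rw [pvBxor_coset2]
  · exact (pvUnion_mem span d _).mpr (Or.inl (by rw [pvBxor_coset3]; exact hC _ hx _ hy))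

lemma pvStep_some {dlen : Int} {span span' : PySem.Set Int} {d : Int}
    (h : pvSpanStep dlen (some span) d = some span') (hI : pvInv span) :
    pvInv span' ∧ span ⊆ span' ∧ d ∈ span' := by
  unfold pvSpanStep at h
  by_cases hc : PySem.Set.contains span d
  · simp only [hc, if_true] at h
    obtain rfl : span = span' := by injection h
    exact ⟨hI, fun x hx => hx, by simpa [PySem.Set.contains] using hc⟩
  · simp only [hc, if_false, Bool.false_eq_true] at h
    split_ifs at h
    obtain rfl : _ = span' := by injection h
    refine ⟨pvUnion_inv span d hI, fun x hx => (pvUnion_mem span d x).mpr (Or.inl hx), ?_⟩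
    exact (pvUnion_mem span d d).mpr (Or.inr ⟨0, hI.2.1, pvBxor_zero_left d⟩)

-- general invariant: if the fold returns a span, it is closed and contains every processed element
lemma pvFold_inv (dlen : Int) (l : List Int) (span : PySem.Set Int) (hI : pvInv span) :
    l.foldl (pvSpanStep dlen) (some span) = none ∨
    ∃ span', l.foldl (pvSpanStep dlen) (some span) = some span' ∧ pvInv span' ∧ span ⊆ span' ∧
      ∀ d ∈ l, d ∈ span' := by
  induction l generalizing span with
  | nil => exact Or.inr ⟨span, rfl, hI, fun x hx => hx, by simp⟩
  | cons d t ih =>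
    rw [List.foldl_cons]
    cases h : pvSpanStep dlen (some span) d with
    | none => rw [pvFold_none]; exact Or.inl rfl
    | some span1 =>
      obtain ⟨hI1, hsub1, hd1⟩ := pvStep_some h hI
      rcases ih span1 hI1 with hn | ⟨span', heq, hI', hsub', hall⟩
      · exact Or.inl hn
      · refine Or.inr ⟨span', heq, hI', fun x hx => hsub' (hsub1 hx), ?_⟩
        intro x hx
        rcases List.mem_cons.mp hx with rfl | hx
        · exact hsub' hd1
        · exact hall x hx

-- when the whole difference set D is closed, the fold never aborts and stays inside D
lemma pvFold_closed (D : List Int) (hDc : pvClosed D)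
    (l : List Int) (hl : l ⊆ D) (span : PySem.Set Int) (hI : pvInv span) (hs : span ⊆ D) :
    ∃ span', l.foldl (pvSpanStep (PySem.Set.len D)) (some span) = some span' ∧
      pvInv span' ∧ span' ⊆ D ∧ span ⊆ span' ∧ ∀ d ∈ l, d ∈ span' := by
  induction l generalizing span with
  | nil => exact ⟨span, rfl, hI, hs, fun x hx => hx, by simp⟩
  | cons d t ih =>
    have hdD : d ∈ D := hl (List.mem_cons_self)
    have htD : t ⊆ D := fun x hx => hl (List.mem_cons_of_mem d hx)
    rw [List.foldl_cons]
    by_cases hm : d ∈ span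
    · rw [show pvSpanStep (PySem.Set.len D) (some span) d = some span by
        simp [pvSpanStep, PySem.Set.contains, hm]]
      obtain ⟨span', heq, hI', hsubD, hsub', hall⟩ := ih htD span hI hs
      refine ⟨span', heq, hI', hsubD, hsub', ?_⟩
      intro x hx
      rcases List.mem_cons.mp hx with rfl | hx
      · exact hsub' hm
      · exact hall x hx
    · -- the doubled list still fits inside D, so the size cutoff does not fire
      have hmD : (span ++ span.map (fun x => PySem.Int.bxor x d)) ⊆ D := by
        intro y hy
        rcases List.mem_append.mp hy with hy | hy
        · exact hs hy
        · obtain ⟨x, hx, rfl⟩ := List.mem_map.mp hy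
          exact hDc _ (hs hx) _ hdD
      have hinj : Function.Injective (fun x => PySem.Int.bxor x d) := by
        intro x y hxy
        have h2 := congrArg (fun z => PySem.Int.bxor z d) hxy
        simpa [pvBxor_cancel_right] using h2
      have hdisj : span.Disjoint (span.map (fun x => PySem.Int.bxor x d)) := by
        intro y hy hym
        obtain ⟨x, hx, rfl⟩ := List.mem_map.mp hym
        have h3 : PySem.Int.bxor x (PySem.Int.bxor x d) ∈ span := hI.2.2 _ hx _ hy
        rw [← pvBxor_assoc, PySem.Int.bxor_self, pvBxor_zero_left] at h3
        exact hm h3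
      have hlen : (span ++ span.map (fun x => PySem.Int.bxor x d)).length ≤ D.length :=
        pvLen_le _ _ (hI.1.append (hI.1.map hinj) hdisj) hmD
      rw [List.length_append, List.length_map] at hlen
      rw [show pvSpanStep (PySem.Set.len D) (some span) d
            = some (PySem.Set.union span (span.map (fun x => PySem.Int.bxor x d))) by
        simp only [pvSpanStep, PySem.Set.contains]
        rw [if_neg (by simpa using hm), if_neg (by simp [PySem.Set.len]; omega)]]
      have hUD : PySem.Set.union span (span.map (fun x => PySem.Int.bxor x d)) ⊆ D := by
        intro y hy
        rcases (pvUnion_mem span d y).mp hy with hy | ⟨x, hx, rfl⟩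
        · exact hs hy
        · exact hDc _ (hs hx) _ hdD
      obtain ⟨span', heq, hI', hsubD, hsub', hall⟩ := ih htD _ (pvUnion_inv span d hI) hUD
      have hspan : span ⊆ span' := fun x hx => hsub' ((pvUnion_mem span d x).mpr (Or.inl hx))
      refine ⟨span', heq, hI', hsubD, hspan, ?_⟩
      intro x hx
      rcases List.mem_cons.mp hx with rfl | hx
      · exact hsub' ((pvUnion_mem span x x).mpr (Or.inr ⟨0, hI.2.1, pvBxor_zero_left x⟩))
      · exact hall x hx

-- ===== VERDICT (by name: the statement is the Claim_ definition above) =====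
theorem is_affine_subspace_py_spec : Claim_equal_is_affine_subspace_py := by
  intro points _
  unfold Spec_is_affine_subspace_py is_affine_subspace_py is_affine_subspace_py_alt
  cases points with
  | nil => rfl
  | cons p0 rest =>
    simp only
    by_cases hb : (PySem.Int.band ((p0 :: rest).length : Int) (((p0 :: rest).length : Int) - 1) != 0) = true
    · rw [if_pos hb, if_pos hb]
    · rw [if_neg hb, if_neg hb]
      set D : PySem.Set Int := PySem.Set.ofList ((p0 :: rest).map (fun p => PySem.Int.bxor p p0)) with hDdef
      have hDn : D.Nodup := PySem.Set.nodup_ofList _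
      have h0D : (0 : Int) ∈ D := by
        rw [hDdef, PySem.Set.mem_ofList]
        exact List.mem_map.mpr ⟨p0, List.mem_cons_self, PySem.Int.bxor_self p0⟩
      have hI0 : pvInv (PySem.Set.ofList [0]) := by
        refine ⟨by decide, by decide, ?_⟩
        intro a ha b hb
        simp [PySem.Set.ofList, PySem.Set.add, PySem.Set.contains, PySem.Set.empty] at ha hb
        subst ha; subst hb
        simp only [PySem.Int.bxor_self]
        decide
      have hsub0 : (PySem.Set.ofList [(0:Int)]) ⊆ D := by
        intro x hx
        simp [PySem.Set.ofList, PySem.Set.add, PySem.Set.contains, PySem.Set.empty] at hx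
        subst hx; exact h0D
      by_cases hc : pvClosed D
      · obtain ⟨span', heq, hI', hsubD, _, hall⟩ :=
          pvFold_closed D hc D (fun x hx => hx) _ hI0 hsub0
        rw [heq]
        have hlen : span'.length = D.length :=
          Nat.le_antisymm (pvLen_le _ _ hI'.1 hsubD) (pvLen_le _ _ hDn (fun x hx => hall x hx))
        rw [(pvAll_iff D).mpr hc]
        simp [PySem.Set.len, hlen]
      · have hA : (D.all (fun a => D.all (fun b => PySem.Set.contains D (PySem.Int.bxor a b)))) = false := by
          rcases Bool.dichotomy (D.all (fun a => D.all (fun b => PySem.Set.contains D (PySem.Int.bxor a b)))) with h | h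
          · exact h
          · exact absurd ((pvAll_iff D).mp h) hc
        rw [hA]
        rcases pvFold_inv (PySem.Set.len D) D _ hI0 with hn | ⟨span', heq, hI', _, hall⟩
        · rw [hn]
        · rw [heq]
          by_cases hlen : span'.length = D.length
          · exfalso
            have hmem := pvMem_eq D span' hDn hI'.1 (fun x hx => hall x hx) (le_of_eq hlen)
            exact hc (fun a ha b hb => (hmem _).mp (hI'.2.2 a ((hmem a).mpr ha) b ((hmem b).mpr hb)))
          · simp [PySem.Set.len]
            omega
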